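-- pv_equiv track=rewrite | github.com/Neihouse/music-platform-core | my-app/export_codebase.py | is_relevant_line
-- ===== SOURCE A (Python) =====
-- def is_relevant_line(line):
--     """
--     Determines if a line contains information relevant for Mantine migration.
--     """
--     relevant_patterns = [
--         'import',
--         'export',
--         'function',
--         'interface',
--         'type',
--         '@',  # For decorators
--         'shadcn',
--         'mantine',
--         'component',
--         'props',
--         'styled',
--         'theme',
--         'css',
--         'className',
--         'style'
--     ]
--     return any(pattern in line.lower() for pattern in relevant_patterns)
-- ===== SOURCE B (Python) =====
-- _RELEVANT_PATTERNS = [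
--     'import',
--     'export',
--     'function',
--     'interface',
--     'type',
--     '@',
--     'shadcn',
--     'mantine',
--     'component',
--     'props',
--     'styled',
--     'theme',
--     'css',
--     'className',
--     'style',
-- ]
--
--
-- def is_relevant_line(line):
--     """Single left-to-right pass: at each position of the lowered line,
--     check whether some pattern starts there (lowering happens once)."""
--     lowered = line.lower()
--     for i in range(len(lowered) + 1):
--         for pattern in _RELEVANT_PATTERNS:
--             if lowered.startswith(pattern, i):
--                 return True
--     return False
-- ===== Notes on version B (the rewrite author's own statement) =====
-- stated objective: alternative
-- what changed: B lowers the line once and makes a single left-to-right positional pass checking whether any pattern starts at each position, replacing A's 16 independent substring scans each over a freshly lowered copy of the line.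
import Mathlib
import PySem

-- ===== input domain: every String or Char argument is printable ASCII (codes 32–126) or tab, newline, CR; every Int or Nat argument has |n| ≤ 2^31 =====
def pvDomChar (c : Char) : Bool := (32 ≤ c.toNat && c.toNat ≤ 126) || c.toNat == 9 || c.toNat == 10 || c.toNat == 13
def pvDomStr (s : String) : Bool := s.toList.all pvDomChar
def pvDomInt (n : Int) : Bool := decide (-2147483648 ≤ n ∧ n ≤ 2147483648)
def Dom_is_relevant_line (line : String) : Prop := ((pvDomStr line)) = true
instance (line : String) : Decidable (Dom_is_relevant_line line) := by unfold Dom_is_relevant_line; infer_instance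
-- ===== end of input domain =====

-- B lowers the line once and makes a single left-to-right pass, checking each
-- position for a pattern prefix, instead of A's 16 independent substring scans
-- each over a freshly lowered copy (objective: alternative decomposition).

-- ===== PORT A =====
-- the literal pattern list of A
def relevantPatterns : List String :=
  ["import", "export", "function", "interface", "type", "@", "shadcn",
   "mantine", "component", "props", "styled", "theme", "css", "className", "style"]

-- any(pattern in line.lower() for pattern in relevant_patterns)
def is_relevant_line (line : String) : Bool :=
  relevantPatterns.any (fun p => PySem.Str.isIn p (PySem.Str.lower line))

-- ===== PORT B =====
-- the loop over i in range(len(lowered)+1): check each suffix, then move one char right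
def scanRelevant (cs : List Char) : Bool :=
  relevantPatterns.any (fun p => PySem.Chars.startswith cs p.toList) ||
    (match cs with
     | [] => false
     | _ :: t => scanRelevant t)

def is_relevant_line_alt (line : String) : Bool :=
  scanRelevant (PySem.Str.lower line).toList

-- ===== PRECONDITION & SPEC =====
def Spec_is_relevant_line (line : String) (out : Bool) : Prop := out = is_relevant_line_alt line
instance (line : String) (out : Bool) : Decidable (Spec_is_relevant_line line out) := by unfold Spec_is_relevant_line; infer_instance

-- ===== CLAIM (what is proved, stated in full; the proofs are below) =====
def Claim_equal_is_relevant_line : Prop := ∀ (line : String), Dom_is_relevant_line line → Spec_is_relevant_line line (is_relevant_line line)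

-- ===== LEMMAS AND PROOFS =====

-- B's scan finds a pattern iff some pattern is a prefix of some suffix
theorem scanRelevant_iff (cs : List Char) :
    scanRelevant cs = true ↔ ∃ p ∈ relevantPatterns, ∃ j, p.toList <+: cs.drop j := by
  induction cs with
  | nil =>
    simp [scanRelevant, PySem.Chars.startswith_iff]
  | cons c t ih =>
    rw [scanRelevant]
    simp only [Bool.or_eq_true, ih, List.any_eq_true, PySem.Chars.startswith_iff]
    constructor
    · rintro (⟨p, hp, hpre⟩ | ⟨p, hp, j, hpre⟩)
      · exact ⟨p, hp, 0, by simpa using hpre⟩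
      · exact ⟨p, hp, j + 1, by simpa using hpre⟩
    · rintro ⟨p, hp, j, hpre⟩
      cases j with
      | zero => exact Or.inl ⟨p, hp, by simpa using hpre⟩
      | succ j => exact Or.inr ⟨p, hp, j, by simpa using hpre⟩

-- ===== VERDICT (by name: the statement is the Claim_ definition above) =====
theorem is_relevant_line_spec : Claim_equal_is_relevant_line := by
  intro line _
  unfold Spec_is_relevant_line is_relevant_line is_relevant_line_alt
  rcases hb : scanRelevant (PySem.Str.lower line).toList with _ | _
  · -- B says false: no pattern occurs anywhere
    rw [Bool.eq_false_iff] at hb ⊢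
    intro ha
    apply hb
    rw [scanRelevant_iff]
    simp only [List.any_eq_true] at ha
    obtain ⟨p, hp, hin⟩ := ha
    rw [PySem.Str.isIn_iff_infix, ← PySem.Chars.isIn_iff_infix,
      ← PySem.Chars.exists_prefix_drop_iff_isIn] at hin
    obtain ⟨j, hj⟩ := hin
    exact ⟨p, hp, j, hj⟩
  · -- B says true: some pattern occurs
    rw [scanRelevant_iff] at hb
    obtain ⟨p, hp, j, hpre⟩ := hb
    simp only [List.any_eq_true]
    refine ⟨p, hp, ?_⟩
    rw [PySem.Str.isIn_iff_infix, ← PySem.Chars.isIn_iff_infix,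
      ← PySem.Chars.exists_prefix_drop_iff_isIn]
    exact ⟨j, hpre⟩
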